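-- pv_equiv track=rewrite | github.com/divyapathak99/CS50-Harvard-2021 | pset6/credit/credit.py | type1
-- ===== SOURCE A (Python) =====
-- def type1(x):
--     text = str(x)
--     d = 0
--     for i in range(len(text) - 2, -1, -2):
--         a = 2 * int(text[i])
--         for j in str(a):
--             d += int(j)
--     return d
-- ===== SOURCE B (Python) =====
-- def type1(x):
--     # Luhn doubled-digit sum computed arithmetically: every second digit of
--     # abs(x) from the right (skipping the last digit), doubled, with the
--     # standard v-9 reduction instead of summing the digits of str(2*d).
--     n = abs(x) // 10
--     total = 0
--     while n:
--         v = 2 * (n % 10)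
--         total += v - 9 if v > 9 else v
--         n //= 100
--     return total
-- ===== Notes on version B (the rewrite author's own statement) =====
-- stated objective: simpler
-- what changed: B drops the string round-trips entirely: instead of str(x), an index range over every second character, and an inner loop summing the digits of str(2*d), it runs one arithmetic loop on n = abs(x) floor-divided by ten, doubling the last digit of n, subtracting nine when the doubled value exceeds nine, and stepping n down by two digits.
import Mathlib
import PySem

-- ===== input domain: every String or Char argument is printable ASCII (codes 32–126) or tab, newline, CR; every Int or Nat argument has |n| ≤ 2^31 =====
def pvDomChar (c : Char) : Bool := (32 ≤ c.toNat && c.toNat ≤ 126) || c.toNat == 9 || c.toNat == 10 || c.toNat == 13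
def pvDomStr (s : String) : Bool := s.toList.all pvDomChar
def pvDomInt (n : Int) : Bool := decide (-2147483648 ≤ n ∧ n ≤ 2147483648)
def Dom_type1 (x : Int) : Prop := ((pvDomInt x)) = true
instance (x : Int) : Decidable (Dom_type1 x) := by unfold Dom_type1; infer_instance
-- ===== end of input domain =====

-- B replaces A's string walk (str(x), every second index from the right, summing the
-- digits of str(2*d) in an inner loop) by a purely arithmetic loop on abs(x)//10 with
-- the standard Luhn reduction v-9; objective: simpler (no strings, no inner loop).

-- ===== PORT A =====
-- str(x)[i] is ported as its character; int(<1-char string>) as PySem.Int.ofChars? [c].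
-- The .getD defaults only totalize the Lean function: Python raises exactly there
-- (int('-') at index 0), and Pre_type1 excludes those inputs.
def type1 (x : Int) : Int :=
  let text := PySem.Int.toChars x          -- text = str(x), as its list of characters
  (PySem.List.pyRange ((text.length : Int) - 2) (-1) (-2)).foldl
    (fun d i =>
      let a := 2 * ((PySem.Int.ofChars? [(PySem.List.pyGet? text i).getD '0']).getD 0)
      (PySem.Int.toChars a).foldl (fun d j => d + (PySem.Int.ofChars? [j]).getD 0) d)
    0

-- ===== PORT B =====
-- Source B's `while n:` loop on n = abs(x)//10; the loop variable is a nonnegative int,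
-- on which Python's % and // coincide with Nat's % and /, so the state is a Nat.
def altLoop : Nat → Int → Int
  | 0, total => total
  | (k+1), total =>
      let v : Int := 2 * (((k+1 : Nat) : Int) % 10)
      altLoop ((k+1) / 100) (total + (if v > 9 then v - 9 else v))
  decreasing_by exact Nat.div_lt_self (Nat.succ_pos k) (by omega)

def type1_alt (x : Int) : Int := altLoop (x.natAbs / 10) 0

-- ===== PRECONDITION & SPEC =====
-- Pre_ excludes negative x whose decimal representation has an odd number of digits
-- (equivalently: str(x) of even length): there A's index range reaches the '-' sign
-- and int('-') raises ValueError.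
def Pre_type1 (x : Int) : Prop := 0 ≤ x ∨ (PySem.Int.toChars x).length % 2 = 1
instance (x : Int) : Decidable (Pre_type1 x) := by unfold Pre_type1; infer_instance
def pvWitness_type1 : Int := 1234

def Spec_type1 (x : Int) (out : Int) : Prop := out = type1_alt x
instance (x : Int) (out : Int) : Decidable (Spec_type1 x out) := by unfold Spec_type1; infer_instance

-- ===== CLAIM (what is proved, stated in full; the proofs are below) =====
def Claim_equal_type1 : Prop := ∀ (x : Int), Dom_type1 x → Pre_type1 x → Spec_type1 x (type1 x)

-- ===== LEMMAS AND PROOFS =====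


def rep (n : Nat) : List Char :=
  if _h : n < 10 then [Nat.digitChar n] else rep (n / 10) ++ [Nat.digitChar (n % 10)]
  termination_by n
  decreasing_by exact Nat.div_lt_self (by omega) (by omega)

lemma toDigitsCore_append (f : Nat) : ∀ (n : Nat) (l : List Char),
    Nat.toDigitsCore 10 f n l = Nat.toDigitsCore 10 f n [] ++ l := by
  induction f with
  | zero => intro n l; simp [Nat.toDigitsCore]
  | succ f ih =>
    intro n l
    simp only [Nat.toDigitsCore]
    by_cases h : n / 10 = 0
    · simp [h]
    · simp only [if_neg h]
      rw [ih (n / 10) (Nat.digitChar (n % 10) :: l), ih (n / 10) [Nat.digitChar (n % 10)]]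
      simp

lemma toDigitsCore_eq_rep (f : Nat) : ∀ (n : Nat), n < f →
    Nat.toDigitsCore 10 f n [] = rep n := by
  induction f with
  | zero => intro n h; omega
  | succ f ih =>
    intro n h
    simp only [Nat.toDigitsCore]
    by_cases h10 : n < 10
    · have : n / 10 = 0 := Nat.div_eq_of_lt h10
      rw [rep]
      simp [this, h10, Nat.mod_eq_of_lt h10]
    · have hne : ¬ n / 10 = 0 := by omega
      simp only [hne, reduceIte]
      rw [toDigitsCore_append, ih (n / 10) (by omega)]
      conv_rhs => rw [rep]
      rw [dif_neg h10]

lemma toDigits_eq_rep (n : Nat) : Nat.toDigits 10 n = rep n :=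
  toDigitsCore_eq_rep (n + 1) n (Nat.lt_succ_self n)

lemma rep_len_pos (n : Nat) : 0 < (rep n).length := by
  rw [rep]
  split <;> simp


lemma pyRange_neg2_nil (a b : Int) (h : a ≤ b) : PySem.List.pyRange a b (-2) = [] := by
  simp [PySem.List.pyRange]
  intro h2
  omega

lemma pyRange_neg2_cons (a b : Int) (h : b < a) :
    PySem.List.pyRange a b (-2) = a :: PySem.List.pyRange (a - 2) b (-2) := by
  simp only [PySem.List.pyRange]
  norm_num
  rw [if_pos h]
  by_cases h2 : b < a - 2
  · rw [if_pos h2]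
    have e1 : ((a - b + 2 - 1) / 2).toNat = ((a - 2 - b + 2 - 1) / 2).toNat + 1 := by omega
    rw [e1, List.range_succ_eq_map]
    simp [List.map_map]
    intro k _
    ring
  · rw [if_neg h2]
    have e1 : ((a - b + 2 - 1) / 2).toNat = 1 := by omega
    rw [e1]
    simp [List.range_succ]

lemma mem_pyRange_neg2 (a : Int) (i : Int) (h : i ∈ PySem.List.pyRange a (-1) (-2)) :
    0 ≤ i ∧ i ≤ a := by
  simp only [PySem.List.pyRange] at h
  norm_num at h
  split_ifs at h with h1
  · obtain ⟨k, hk, rfl⟩ := h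
    have hk' : (k : Int) < (a + 1 + 2 - 1) / 2 := by omega
    constructor <;> omega
  · simp at h

lemma pyRange_neg2_shift (a : Int) (ha : -2 ≤ a) (he : a % 2 = 0) :
    PySem.List.pyRange (a + 1) (-1) (-2) = (PySem.List.pyRange a (-1) (-2)).map (· + 1) := by
  simp only [PySem.List.pyRange]
  norm_num
  split_ifs with h1 h2 h2
  · have e : ((a + 1 + 1 + 2 - 1) / 2).toNat = ((a + 1 + 2 - 1) / 2).toNat := by omega
    rw [e]
    apply List.map_congr_left
    intro k _
    simp
    ring
  · have : a = -1 := by omega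
    subst this
    omega
  · omega
  · simp


lemma luhn_inner (d : Nat) (h : d < 10) (acc : Int) :
    (PySem.Int.toChars (2 * (d : Int))).foldl (fun s j => s + (PySem.Int.ofChars? [j]).getD 0) acc
      = acc + (if 2 * (d : Int) > 9 then 2 * (d : Int) - 9 else 2 * (d : Int)) := by
  interval_cases d <;>
    norm_num <;>
    simp only [show PySem.Int.toChars 0 = ['0'] from by decide,
      show PySem.Int.toChars 2 = ['2'] from by decide,
      show PySem.Int.toChars 4 = ['4'] from by decide,
      show PySem.Int.toChars 6 = ['6'] from by decide,
      show PySem.Int.toChars 8 = ['8'] from by decide,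
      show PySem.Int.toChars 10 = ['1','0'] from by decide,
      show PySem.Int.toChars 12 = ['1','2'] from by decide,
      show PySem.Int.toChars 14 = ['1','4'] from by decide,
      show PySem.Int.toChars 16 = ['1','6'] from by decide,
      show PySem.Int.toChars 18 = ['1','8'] from by decide,
      List.foldl,
      show (PySem.Int.ofChars? ['0']).getD 0 = 0 from by decide,
      show (PySem.Int.ofChars? ['1']).getD 0 = 1 from by decide,
      show (PySem.Int.ofChars? ['2']).getD 0 = 2 from by decide,
      show (PySem.Int.ofChars? ['4']).getD 0 = 4 from by decide,
      show (PySem.Int.ofChars? ['6']).getD 0 = 6 from by decide,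
      show (PySem.Int.ofChars? ['8']).getD 0 = 8 from by decide] <;>
    omega

lemma pyGet?_append_lt {α : Type} (xs ys : List α) (i : Int) (h0 : 0 ≤ i) (h : i < xs.length) :
    PySem.List.pyGet? (xs ++ ys) i = PySem.List.pyGet? xs i := by
  have hi : i = (i.toNat : Int) := by omega
  rw [hi, PySem.List.pyGet?_natCast, PySem.List.pyGet?_natCast]
  exact List.getElem?_append_left (by omega)

def aStep (cs : List Char) (d : Int) (i : Int) : Int :=
  let a := 2 * ((PySem.Int.ofChars? [(PySem.List.pyGet? cs i).getD '0']).getD 0)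
  (PySem.Int.toChars a).foldl (fun d j => d + (PySem.Int.ofChars? [j]).getD 0) d

def aFold (cs : List Char) (init : Int) : Int :=
  (PySem.List.pyRange ((cs.length : Int) - 2) (-1) (-2)).foldl (aStep cs) init

lemma digit_parse (d : Nat) (h : d < 10) : PySem.Int.ofChars? [Nat.digitChar d] = some (d : Int) := by
  interval_cases d <;> decide

lemma type1_eq_aFold (x : Int) : type1 x = aFold (PySem.Int.toChars x) 0 := rfl

lemma altLoop_succ (k : Nat) (total : Int) :
    altLoop (k+1) total = altLoop ((k+1) / 100)
      (total + (if 2 * (((k+1 : Nat) : Int) % 10) > 9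
                then 2 * (((k+1 : Nat) : Int) % 10) - 9 else 2 * (((k+1 : Nat) : Int) % 10))) := by
  rw [altLoop]

lemma aStep_digit (cs : List Char) (i : Int) (d : Nat) (hd : d < 10)
    (hg : PySem.List.pyGet? cs i = some (Nat.digitChar d)) (acc : Int) :
    aStep cs acc i = acc + (if 2 * (d : Int) > 9 then 2 * (d : Int) - 9 else 2 * (d : Int)) := by
  unfold aStep
  rw [hg]
  simp only [Option.getD_some, digit_parse d hd]
  exact luhn_inner d hd acc

lemma rep_small (n : Nat) (h : n < 10) : rep n = [Nat.digitChar n] := by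
  rw [rep]; simp [h]

lemma rep_decomp (n : Nat) (h : 100 ≤ n) :
    rep n = (rep (n / 100) ++ [Nat.digitChar (n / 10 % 10)]) ++ [Nat.digitChar (n % 10)] := by
  conv_lhs => rw [rep]
  rw [dif_neg (by omega : ¬ n < 10)]
  conv_lhs => rw [rep]
  rw [dif_neg (by omega : ¬ n / 10 < 10), Nat.div_div_eq_div_mul]

lemma aFold_rep (n : Nat) : ∀ (init : Int), aFold (rep n) init = altLoop (n / 10) init := by
  induction n using Nat.strong_induction_on with
  | _ n ih =>
    intro init
    by_cases h10 : n < 10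
    · rw [rep_small n h10]
      unfold aFold
      rw [show ((([Nat.digitChar n].length : Nat) : Int) - 2 : Int) = -1 by simp]
      rw [pyRange_neg2_nil _ _ (by omega)]
      rw [Nat.div_eq_of_lt h10, altLoop]
      simp
    · by_cases h100 : n < 100
      · -- two characters
        have hm : n / 10 < 10 := by omega
        have hrep : rep n = [Nat.digitChar (n / 10)] ++ [Nat.digitChar (n % 10)] := by
          conv_lhs => rw [rep]
          rw [dif_neg (by omega : ¬ n < 10), rep_small _ hm]
        rw [hrep]
        unfold aFold
        have hl : (((([Nat.digitChar (n / 10)] ++ [Nat.digitChar (n % 10)]).length : Nat) : Int) - 2 : Int) = 0 := by simp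
        rw [hl, pyRange_neg2_cons 0 (-1) (by omega), pyRange_neg2_nil _ _ (by omega)]
        simp only [List.foldl_cons, List.foldl_nil]
        have hget : PySem.List.pyGet? ([Nat.digitChar (n / 10)] ++ [Nat.digitChar (n % 10)]) 0
            = some (Nat.digitChar (n / 10)) := by
          rw [show (0 : Int) = ((0 : Nat) : Int) from rfl, PySem.List.pyGet?_natCast]
          rfl
        rw [aStep_digit _ _ _ hm hget]
        obtain ⟨k, hk⟩ : ∃ k, n / 10 = k + 1 := ⟨n / 10 - 1, by omega⟩
        rw [hk, altLoop_succ]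
        have h1 : (((k+1 : Nat) : Int) % 10) = ((k+1 : Nat) : Int) := by omega
        have h2 : (k+1) / 100 = 0 := by omega
        rw [h1, h2, altLoop]
      · -- at least three characters
        have hm10 : n / 10 % 10 < 10 := Nat.mod_lt _ (by omega)
        set D := rep (n / 100) with hD
        have hdec := rep_decomp n (by omega)
        rw [hdec]
        unfold aFold
        have hlen : ((((D ++ [Nat.digitChar (n / 10 % 10)]) ++ [Nat.digitChar (n % 10)]).length : Int) - 2)
            = (D.length : Int) := by simp
        have hDpos : 0 < D.length := rep_len_pos _
        rw [hlen, pyRange_neg2_cons _ (-1) (by omega)]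
        simp only [List.foldl_cons]
        -- the head step reads the tens digit
        have hget : PySem.List.pyGet? ((D ++ [Nat.digitChar (n / 10 % 10)]) ++ [Nat.digitChar (n % 10)]) ((D.length : Int))
            = some (Nat.digitChar (n / 10 % 10)) := by
          rw [pyGet?_append_lt _ _ _ (by omega) (by simp), PySem.List.pyGet?_natCast]
          exact List.getElem?_concat_length
        rw [aStep_digit _ _ _ hm10 hget]
        -- the tail of the range never leaves D
        have hcong : ∀ (acc i : Int), i ∈ PySem.List.pyRange ((D.length : Int) - 2) (-1) (-2) →
            aStep ((D ++ [Nat.digitChar (n / 10 % 10)]) ++ [Nat.digitChar (n % 10)]) acc i = aStep D acc i := by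
          intro acc i hi
          obtain ⟨hi0, hi2⟩ := mem_pyRange_neg2 _ _ hi
          unfold aStep
          rw [List.append_assoc, pyGet?_append_lt _ _ _ hi0 (by omega)]
        rw [PySem.List.foldl_congr_mem _ _ _ _ hcong]
        have : List.foldl (aStep D) (init + (if 2 * ((n / 10 % 10 : Nat) : Int) > 9 then 2 * ((n / 10 % 10 : Nat) : Int) - 9 else 2 * ((n / 10 % 10 : Nat) : Int))) (PySem.List.pyRange ((D.length : Int) - 2) (-1) (-2)) = aFold D (init + (if 2 * ((n / 10 % 10 : Nat) : Int) > 9 then 2 * ((n / 10 % 10 : Nat) : Int) - 9 else 2 * ((n / 10 % 10 : Nat) : Int))) := rfl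
        rw [this, hD, ih (n / 100) (by omega)]
        -- unfold one step of altLoop on the right
        obtain ⟨k, hk⟩ : ∃ k, n / 10 = k + 1 := ⟨n / 10 - 1, by omega⟩
        rw [hk, altLoop_succ]
        have e1 : n / 100 / 10 = (k + 1) / 100 := by omega
        rw [e1]
        push_cast
        ring_nf

lemma pyGet?_cons_succ {α : Type} (c : α) (D : List α) (i : Int) (h0 : 0 ≤ i) :
    PySem.List.pyGet? (c :: D) (i + 1) = PySem.List.pyGet? D i := by
  have h1 : i + 1 = ((i.toNat + 1 : Nat) : Int) := by omega
  have h2 : i = ((i.toNat : Nat) : Int) := by omega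
  rw [h1, PySem.List.pyGet?_natCast, h2, PySem.List.pyGet?_natCast]
  simp
  congr 1
  omega

lemma aFold_neg (D : List Char) (hD : 0 < D.length) (he : D.length % 2 = 0) (init : Int) :
    aFold ('-' :: D) init = aFold D init := by
  unfold aFold
  have hl : ((('-' :: D).length : Int) - 2) = ((D.length : Int) - 2) + 1 := by simp; ring
  rw [hl, pyRange_neg2_shift _ (by omega) (by omega), List.foldl_map]
  apply PySem.List.foldl_congr_mem
  intro acc i hi
  obtain ⟨hi0, _⟩ := mem_pyRange_neg2 _ _ hi
  unfold aStep
  rw [pyGet?_cons_succ _ _ _ hi0]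

theorem main (x : Int) (hp : (0 ≤ x ∨ (PySem.Int.toChars x).length % 2 = 1)) :
    type1 x = type1_alt x := by
  rw [type1_eq_aFold]
  unfold type1_alt
  by_cases hx : x < 0
  · have hc : PySem.Int.toChars x = '-' :: Nat.toDigits 10 x.natAbs := by
      unfold PySem.Int.toChars
      rw [if_pos hx]
    have hlen : (Nat.toDigits 10 x.natAbs).length % 2 = 0 := by
      rcases hp with hp | hp
      · omega
      · rw [hc] at hp
        simp at hp
        omega
    rw [hc, toDigits_eq_rep] at *
    rw [aFold_neg _ (rep_len_pos _) hlen, aFold_rep]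
  · have hc : PySem.Int.toChars x = Nat.toDigits 10 x.toNat := by
      unfold PySem.Int.toChars
      rw [if_neg hx]
    have : x.natAbs = x.toNat := by omega
    rw [hc, toDigits_eq_rep, aFold_rep, this]


-- ===== VERDICT (by name: the statement is the Claim_ definition above) =====
theorem type1_spec : Claim_equal_type1 := by
  intro x _ hpre
  show type1 x = type1_alt x
  exact main x hpre
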